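-- pv_equiv track=rewrite | github.com/HaigBishop/particle-distortion-analysis | tracking.py | smooth_y_positions
-- ===== SOURCE A (Python) =====
-- def smooth_y_positions(y_positions, starting_smooth_position):
--     """Takes a list of y positions and returns a list of y positions.
--     - if smooth is true, the y positions are smoothed simply by only allowing the y position to move up or down by 1 pixel."""
--     smoothed_y_positions = []
--     for i in range(len(y_positions)):
--         # If this is the first position
--         if i == 0:
--             # Set the starting position
--             smoothed_y_positions.append(starting_smooth_position)
--         else:
--             # If the position is equal to the previous position, keep it
--             if y_positions[i] == smoothed_y_positions[-1]:
--                 smoothed_y_positions.append(y_positions[i])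
--             # If the position is greater than the previous position, move it up by 1 pixel
--             elif y_positions[i] > smoothed_y_positions[-1]:
--                 smoothed_y_positions.append(smoothed_y_positions[-1] + 1)
--             # If the position is less than the previous position, move it down by 1 pixel
--             else:
--                 smoothed_y_positions.append(smoothed_y_positions[-1] - 1)
--     return smoothed_y_positions
-- ===== SOURCE B (Python) =====
-- from itertools import groupby
--
-- def smooth_y_positions(y_positions, starting_smooth_position):
--     """Takes a list of y positions and returns a list of y positions.
--     Run-length view: group the targets into runs of equal values; toward each
--     run's value emit an arithmetic ramp of +-1 steps (saturating at the value),
--     then repeat the value for the rest of the run."""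
--     if not y_positions:
--         return []
--     out = [starting_smooth_position]
--     cur = starting_smooth_position
--     for val, grp in groupby(y_positions[1:]):
--         k = sum(1 for _ in grp)
--         sgn = 1 if cur < val else -1
--         m = min(k, abs(val - cur))
--         out.extend(cur + sgn * (i + 1) for i in range(m))
--         cur += sgn * m
--         out.extend([val] * (k - m))
--     return out
-- ===== Notes on version B (the rewrite author's own statement) =====
-- stated objective: alternative
-- what changed: B run-length-groups the targets with itertools.groupby and emits, per run, a closed-form arithmetic ramp (range) saturating at the run's value plus a repeated tail, instead of A's per-element compare-and-step on smoothed_y_positions[-1].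
import Mathlib
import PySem

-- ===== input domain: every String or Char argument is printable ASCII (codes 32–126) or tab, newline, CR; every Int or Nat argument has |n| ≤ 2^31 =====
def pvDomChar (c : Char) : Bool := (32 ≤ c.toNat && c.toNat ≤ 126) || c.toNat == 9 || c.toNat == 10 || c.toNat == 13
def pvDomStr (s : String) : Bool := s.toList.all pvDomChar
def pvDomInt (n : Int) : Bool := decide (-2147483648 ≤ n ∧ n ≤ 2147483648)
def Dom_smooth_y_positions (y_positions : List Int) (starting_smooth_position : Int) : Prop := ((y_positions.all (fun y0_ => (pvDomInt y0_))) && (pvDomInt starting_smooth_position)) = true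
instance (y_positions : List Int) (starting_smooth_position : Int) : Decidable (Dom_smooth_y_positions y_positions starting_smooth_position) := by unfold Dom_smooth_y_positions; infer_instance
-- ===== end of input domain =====

-- B replaces A's per-element compare-and-step loop by run-length grouping
-- (itertools.groupby) of the targets, emitting per run a closed-form arithmetic
-- ramp saturating at the run's value; objective: alternative, same O(n) cost.

-- ===== PORT A =====
-- literal transliteration of A's for-loop over range(len(y_positions)),
-- appending to the accumulator list and reading its last element via [-1]
def smooth_y_positions (y_positions : List Int) (starting_smooth_position : Int) : List Int :=
  (PySem.List.pyRange 0 (y_positions.length : Int) 1).foldl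
    (fun smoothed i =>
      if i = 0 then
        smoothed ++ [starting_smooth_position]
      else
        let yi := PySem.List.pyGetD y_positions i 0        -- y_positions[i]; always in range
        let prev := PySem.List.pyGetD smoothed (-1) 0      -- smoothed_y_positions[-1]; list nonempty here
        if yi = prev then smoothed ++ [yi]
        else if prev < yi then smoothed ++ [prev + 1]
        else smoothed ++ [prev - 1]) []

-- ===== PORT B =====
-- run-length encoding of the list, as itertools.groupby yields it: (value, run length)
def pvRuns : List Int → List (Int × Nat)
  | [] => []
  | y :: ys =>
    (y, (ys.takeWhile (· == y)).length + 1) :: pvRuns (ys.dropWhile (· == y))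
termination_by l => l.length
decreasing_by
  have := List.length_dropWhile_le (· == y) ys
  simp; omega

-- one run's output: the ramp `cur + sgn*(i+1) for i in range(m)` then `[val]*(k-m)`
def pvSeg (cur val : Int) (k : Nat) : List Int :=
  let sgn : Int := if cur < val then 1 else -1
  let m := min k (val - cur).natAbs
  ((List.range m).map (fun i : Nat => cur + sgn * ((i : Int) + 1))) ++ List.replicate (k - m) val

def smooth_y_positions_alt (y_positions : List Int) (starting_smooth_position : Int) : List Int :=
  match y_positions with
  | [] => []
  | _ :: rest =>
    ((pvRuns rest).foldl
      (fun (st : List Int × Int) vk =>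
        (st.1 ++ pvSeg st.2 vk.1 vk.2,
         st.2 + (if st.2 < vk.1 then 1 else -1) * ((min vk.2 (vk.1 - st.2).natAbs : Nat) : Int)))
      ([starting_smooth_position], starting_smooth_position)).1

-- ===== PRECONDITION & SPEC =====
def Spec_smooth_y_positions (y_positions : List Int) (starting_smooth_position : Int) (out : List Int) : Prop := out = smooth_y_positions_alt y_positions starting_smooth_position
instance (y_positions : List Int) (starting_smooth_position : Int) (out : List Int) : Decidable (Spec_smooth_y_positions y_positions starting_smooth_position out) := by unfold Spec_smooth_y_positions; infer_instance

-- ===== CLAIM (what is proved, stated in full; the proofs are below) =====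
def Claim_equal_smooth_y_positions : Prop := ∀ (y_positions : List Int) (starting_smooth_position : Int), Dom_smooth_y_positions y_positions starting_smooth_position → Spec_smooth_y_positions y_positions starting_smooth_position (smooth_y_positions y_positions starting_smooth_position)

-- ===== LEMMAS AND PROOFS =====

-- A's single smoothing step (its branch ladder, element already fetched)
def pvStep (prev y : Int) : Int :=
  if y = prev then y else if prev < y then prev + 1 else prev - 1

-- A's loop body for i ≥ 1, with the element already fetched
def pvBodyA (smoothed : List Int) (y : Int) : List Int :=
  let prev := PySem.List.pyGetD smoothed (-1) 0
  if y = prev then smoothed ++ [y]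
  else if prev < y then smoothed ++ [prev + 1]
  else smoothed ++ [prev - 1]

-- the per-element smoothing sequence after the first output element
def pvTail (cur : Int) : List Int → List Int
  | [] => []
  | y :: ys => pvStep cur y :: pvTail (pvStep cur y) ys

-- B's loop, as recursion over the runs
def pvEmit (cur : Int) : List (Int × Nat) → List Int
  | [] => []
  | (v, k) :: rs =>
    pvSeg cur v k ++ pvEmit (cur + (if cur < v then 1 else -1) * ((min k (v - cur).natAbs : Nat) : Int)) rs

lemma pvBodyA_append (pre : List Int) (p y : Int) :
    pvBodyA (pre ++ [p]) y = (pre ++ [p]) ++ [pvStep p y] := by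
  simp only [pvBodyA, PySem.List.pyGetD_neg_one_append_singleton, pvStep]
  split_ifs <;> simp_all

lemma pvFoldA (rest : List Int) : ∀ (pre : List Int) (p : Int),
    rest.foldl pvBodyA (pre ++ [p]) = (pre ++ [p]) ++ pvTail p rest := by
  induction rest with
  | nil => intro pre p; simp [pvTail]
  | cons y ys ih =>
    intro pre p
    rw [List.foldl_cons, pvBodyA_append, ih (pre ++ [p]) (pvStep p y)]
    simp [pvTail]

lemma pvFoldB (rs : List (Int × Nat)) : ∀ (out : List Int) (cur : Int),
    (rs.foldl
      (fun (st : List Int × Int) vk =>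
        (st.1 ++ pvSeg st.2 vk.1 vk.2,
         st.2 + (if st.2 < vk.1 then 1 else -1) * ((min vk.2 (vk.1 - st.2).natAbs : Nat) : Int)))
      (out, cur)).1 = out ++ pvEmit cur rs := by
  induction rs with
  | nil => intro out cur; simp [pvEmit]
  | cons vk rs ih =>
    intro out cur
    rw [List.foldl_cons, ih]
    simp [pvEmit]

lemma pvSeg_zero (cur v : Int) : pvSeg cur v 0 = [] := by simp [pvSeg]

lemma pvSeg_succ (cur v : Int) (k : Nat) :
    pvSeg cur v (k + 1) = pvStep cur v :: pvSeg (pvStep cur v) v k := by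
  by_cases he : v = cur
  · subst he
    simp [pvSeg, pvStep, List.replicate_succ]
  · by_cases hlt : cur < v
    · have hs : pvStep cur v = cur + 1 := by simp [pvStep, he, hlt]
      by_cases he2 : cur + 1 = v
      · have hd : (v - cur).natAbs = 1 := by omega
        have hd2 : (v - (cur + 1)).natAbs = 0 := by omega
        rw [hs]
        simp [pvSeg, hd, hlt, he2]
      · have hlt2 : cur + 1 < v := by omega
        have hmin : min (k + 1) (v - cur).natAbs = min k ((v - cur).natAbs - 1) + 1 := by omega
        have hd' : (v - (cur + 1)).natAbs = (v - cur).natAbs - 1 := by omega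
        rw [hs]
        simp only [pvSeg, hlt, hlt2, if_pos, hmin, hd', List.range_succ_eq_map, List.map_cons,
          List.map_map, List.cons_append]
        congr 1
        congr 1
        · apply List.map_congr_left
          intro i _
          simp [Function.comp]
          ring
        · congr 1
          omega
    · have hgt : v < cur := by omega
      have hs : pvStep cur v = cur - 1 := by simp [pvStep, he, hlt]
      have hlt' : ¬ cur - 1 < v := by omega
      by_cases he2 : cur - 1 = v
      · have hd : (v - cur).natAbs = 1 := by omega
        have hd2 : (v - (cur - 1)).natAbs = 0 := by omega
        rw [hs]
        simp [pvSeg, hd, hlt, he2]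
        omega
      · have hmin : min (k + 1) (v - cur).natAbs = min k ((v - cur).natAbs - 1) + 1 := by omega
        have hd' : (v - (cur - 1)).natAbs = (v - cur).natAbs - 1 := by omega
        rw [hs]
        simp only [pvSeg, hlt, hlt', hmin, hd', List.range_succ_eq_map, List.map_cons,
          List.map_map, List.cons_append]
        congr 1
        congr 1
        · apply List.map_congr_left
          intro i _
          simp [Function.comp]
          ring
        · congr 1
          omega


lemma pvCur_succ (cur v : Int) (k : Nat) :
    cur + (if cur < v then 1 else -1) * ((min (k + 1) (v - cur).natAbs : Nat) : Int)
      = pvStep cur v + (if pvStep cur v < v then 1 else -1) * ((min k (v - pvStep cur v).natAbs : Nat) : Int) := by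
  simp only [pvStep]
  split_ifs <;> omega

lemma pvRun (v : Int) : ∀ (k : Nat) (cur : Int) (rest : List Int),
    pvTail cur (List.replicate k v ++ rest)
      = pvSeg cur v k ++ pvTail (cur + (if cur < v then 1 else -1) * ((min k (v - cur).natAbs : Nat) : Int)) rest := by
  intro k
  induction k with
  | zero => intro cur rest; simp [pvSeg_zero]
  | succ k ih =>
    intro cur rest
    rw [List.replicate_succ, List.cons_append]
    show pvStep cur v :: pvTail (pvStep cur v) (List.replicate k v ++ rest) = _
    rw [ih (pvStep cur v) rest, pvSeg_succ, pvCur_succ]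
    simp

lemma pvTail_eq_emit (l : List Int) : ∀ cur, pvTail cur l = pvEmit cur (pvRuns l) := by
  generalize hn : l.length = n
  induction n using Nat.strong_induction_on generalizing l with
  | _ n ih =>
    cases l with
    | nil => intro cur; simp [pvTail, pvRuns, pvEmit]
    | cons y ys =>
      intro cur
      have hrep : ys.takeWhile (· == y) = List.replicate (ys.takeWhile (· == y)).length y :=
        List.eq_replicate_of_mem (fun b hb => by
          have := List.mem_takeWhile_imp hb; simpa using this)
      have hsplit : y :: ys = List.replicate ((ys.takeWhile (· == y)).length + 1) y
          ++ ys.dropWhile (· == y) := by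
        conv_lhs => rw [← List.takeWhile_append_dropWhile (p := (· == y)) (l := ys)]
        rw [List.replicate_succ, List.cons_append]
        rw [← hrep]
      rw [pvRuns]
      conv_lhs => rw [hsplit]
      rw [pvRun, pvEmit]
      congr 1
      have hlen : (ys.dropWhile (· == y)).length < n := by
        have := List.length_dropWhile_le (· == y) ys
        simp at hn; omega
      exact ih _ hlen _ rfl _

-- ===== VERDICT (by name: the statement is the Claim_ definition above) =====
theorem smooth_y_positions_spec : Claim_equal_smooth_y_positions := by
  intro ys start _
  show smooth_y_positions ys start = smooth_y_positions_alt ys start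
  cases ys with
  | nil => simp [smooth_y_positions, smooth_y_positions_alt, PySem.List.pyRange_one_eq_nil]
  | cons y0 rest =>
    unfold smooth_y_positions smooth_y_positions_alt
    rw [PySem.List.pyRange_one_cons (by simp), List.foldl_cons]
    have hinit : (0 : Int) + 1 = 1 := by omega
    rw [if_pos rfl, hinit]
    rw [PySem.List.foldl_congr_mem _ _
        (fun acc i => pvBodyA acc (PySem.List.pyGetD (y0 :: rest) i 0)) _
      (fun acc x hx => by
        have h1 : (1 : Int) ≤ x := (PySem.List.mem_pyRange_one.mp hx).1
        have hx0 : ¬ (x = 0) := by omega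
        simp only [pvBodyA, if_neg hx0])]
    rw [PySem.List.foldl_pyRange_pyGetD' (y0 :: rest) 0 pvBodyA ([] ++ [start]) (by omega)]
    simp only [show Int.toNat 1 = 1 from rfl, List.drop_succ_cons, List.drop_zero]
    rw [pvFoldA rest [] start, pvFoldB (pvRuns rest) [start] start]
    simpa using pvTail_eq_emit rest start
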